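-- pv_equiv track=rewrite | github.com/taewookimmr/Programmers-Problems | etc/fifoschedule3.py | solution
-- ===== SOURCE A (Python) =====
-- def solution(n, cores):
--     m = len(cores)
--     heap = []
--     import heapq
--     for i in range(m):
--         heapq.heappush(heap, [0,i])
--
--     while n>0:
--         acc, i = heapq.heappop(heap)
--         heapq.heappush(heap, [acc+cores[i],i])
--         n-=1
--         if n==0:
--             return i+1
-- ===== SOURCE B (Python) =====
-- def solution(n, cores):
--     m = len(cores)
--     accs = [0] * m
--
--     def pick():
--         b = 0
--         for j in range(1, m):
--             if accs[j] < accs[b]: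
--                 b = j
--         return b
--
--     for _ in range(n - 1):
--         i = pick()
--         accs[i] += cores[i]
--     return pick() + 1
-- ===== Notes on version B (the rewrite author's own statement) =====
-- stated objective: simpler
-- what changed: Replaces the heapq priority queue of [time, index] pairs with a plain per-core accumulator list: each scheduled job is assigned by a linear first-argmin scan over the accumulators instead of heap pushes and pops.
-- outside the precondition, e.g. on solution(0, [3]): A returns None, B returns 1; on solution(1, []): A raises IndexError, B returns 1
import Mathlib
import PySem

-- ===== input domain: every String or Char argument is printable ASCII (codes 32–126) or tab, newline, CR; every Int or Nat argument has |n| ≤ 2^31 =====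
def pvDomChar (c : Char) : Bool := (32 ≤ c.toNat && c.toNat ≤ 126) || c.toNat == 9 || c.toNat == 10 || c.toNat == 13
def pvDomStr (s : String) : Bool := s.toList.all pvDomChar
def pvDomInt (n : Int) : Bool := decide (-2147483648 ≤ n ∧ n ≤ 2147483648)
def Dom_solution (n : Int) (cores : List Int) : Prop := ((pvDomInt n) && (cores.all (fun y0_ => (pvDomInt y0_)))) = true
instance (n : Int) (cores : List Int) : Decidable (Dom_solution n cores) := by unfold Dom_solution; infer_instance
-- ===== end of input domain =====

-- B replaces A's heapq priority queue with a per-core accumulator list and a linear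
-- first-argmin scan per job (objective: simpler; not faster).

-- ===== PORT A =====
-- Python list comparison on the two-element int lists [acc, i] used as heap keys.
def heapLt (a b : Int × Int) : Bool := a.1 < b.1 || (a.1 == b.1 && a.2 < b.2)

-- heapq is a standard-library module, ported semantically (like PySem's sorted/min):
-- the heap holds the multiset of pushed items, heappush adds one, heappop removes the
-- least (the keys [acc, i] pushed by A are pairwise distinct, so CPython's binary-heap
-- layout returns exactly this least element on every pop).
def heapMin : List (Int × Int) → Option (Int × Int)
  | [] => none
  | x :: xs => some (xs.foldl (fun y z => if heapLt z y then z else y) x)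

def heappop (h : List (Int × Int)) : Option ((Int × Int) × List (Int × Int)) :=
  match heapMin h with
  | none => none                -- heappop of an empty heap: IndexError (excluded by Pre_)
  | some y => some (y, h.erase y)

def heappush (h : List (Int × Int)) (x : Int × Int) : List (Int × Int) := h ++ [x]

-- 'while n > 0: … n -= 1' as structural recursion on the fuel n.toNat;
-- 'none' = the loop raised (empty heap) or fell through without returning (n ≤ 0).
def awhile (cores : List Int) (heap : List (Int × Int)) : Nat → Option Int
  | 0 => none
  | k + 1 =>
    match heappop heap with
    | none => none
    | some ((acc, i), h') =>
      let h2 := heappush h' (acc + PySem.List.pyGetD cores i 0, i)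
      if k = 0 then some (i + 1) else awhile cores h2 k

def solution (n : Int) (cores : List Int) : Int :=
  let m : Int := cores.length
  let heap := (PySem.List.pyRange 0 m 1).foldl (fun h i => heappush h (0, i)) []
  (awhile cores heap n.toNat).getD 0

-- ===== PORT B =====
-- pick(): first index with minimal accumulator (strict '<' keeps the earliest).
def pickIdx (accs : List Int) : Int :=
  (PySem.List.pyRange 1 (accs.length : Int) 1).foldl
    (fun b j => if PySem.List.pyGetD accs j 0 < PySem.List.pyGetD accs b 0 then j else b) 0

-- one iteration of B's 'for _ in range(n-1)' body
def stepB (cores accs : List Int) : List Int :=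
  let i := pickIdx accs
  PySem.List.pySetD accs i (PySem.List.pyGetD accs i 0 + PySem.List.pyGetD cores i 0)

def solution_alt (n : Int) (cores : List Int) : Int :=
  let accs := (fun a => stepB cores a)^[(n - 1).toNat] (List.replicate cores.length 0)
  pickIdx accs + 1

-- ===== PRECONDITION & SPEC =====
-- Pre_ excludes n ≤ 0, where A falls through the while loop and returns None (not an
-- int), and cores = [], where A's heappop raises IndexError.
def Pre_solution (n : Int) (cores : List Int) : Prop := 1 ≤ n ∧ cores ≠ []
instance (n : Int) (cores : List Int) : Decidable (Pre_solution n cores) := by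
  unfold Pre_solution; infer_instance

def pvWitness_solution : Int × List Int := (3, [2, 5])

def Spec_solution (n : Int) (cores : List Int) (out : Int) : Prop := out = solution_alt n cores
instance (n : Int) (cores : List Int) (out : Int) : Decidable (Spec_solution n cores out) := by
  unfold Spec_solution; infer_instance

-- ===== CLAIM (what is proved, stated in full; the proofs are below) =====
def Claim_equal_solution : Prop := ∀ (n : Int) (cores : List Int), Dom_solution n cores → Pre_solution n cores → Spec_solution n cores (solution n cores)

-- ===== LEMMAS AND PROOFS =====

-- lexicographic ≤ on (acc, index) pairs, the order the heap keys carry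
def lexLe (a b : Int × Int) : Prop := a.1 < b.1 ∨ (a.1 = b.1 ∧ a.2 ≤ b.2)

theorem lexLe_refl (a : Int × Int) : lexLe a a := by simp [lexLe]

theorem lexLe_trans {a b c : Int × Int} (h1 : lexLe a b) (h2 : lexLe b c) : lexLe a c := by
  simp only [lexLe] at *; omega

theorem lexLe_antisymm {a b : Int × Int} (h1 : lexLe a b) (h2 : lexLe b a) : a = b := by
  obtain ⟨a1, a2⟩ := a; obtain ⟨b1, b2⟩ := b
  simp only [lexLe] at *; simp_all; omega

theorem heapLt_false_iff (a b : Int × Int) : heapLt a b = false ↔ lexLe b a := by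
  simp [heapLt, lexLe]; omega

-- the fold inside heapMin returns a least element (w.r.t. lexLe) of x :: xs
theorem heapLt_true_lexLe {a b : Int × Int} (h : heapLt a b = true) : lexLe a b := by
  simp only [heapLt, Bool.or_eq_true, Bool.and_eq_true, decide_eq_true_eq, beq_iff_eq] at h
  simp only [lexLe]; omega

theorem foldl_min_spec (xs : List (Int × Int)) : ∀ (x : Int × Int),
    (xs.foldl (fun y z => if heapLt z y then z else y) x ∈ x :: xs) ∧
    (∀ z ∈ x :: xs, lexLe (xs.foldl (fun y z => if heapLt z y then z else y) x) z) := by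
  induction xs with
  | nil =>
    intro x
    refine ⟨by simp, ?_⟩
    intro z hz
    simp only [List.mem_cons, List.not_mem_nil, or_false] at hz
    subst hz; exact lexLe_refl _
  | cons a xs ih =>
    intro x
    have h2 := ih (if heapLt a x then a else x)
    have hstep : lexLe (if heapLt a x then a else x) x ∧ lexLe (if heapLt a x then a else x) a := by
      by_cases hlt : heapLt a x = true
      · simp only [hlt, if_true]
        exact ⟨heapLt_true_lexLe hlt, lexLe_refl _⟩
      · have := (heapLt_false_iff a x).mp (by simpa using hlt)
        simp only [hlt]
        exact ⟨lexLe_refl _, this⟩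
    constructor
    · simp only [List.foldl_cons]
      rcases List.mem_cons.mp h2.1 with h | h
      · rw [h]
        split_ifs <;> simp
      · exact List.mem_cons_of_mem _ (List.mem_cons_of_mem _ h)
    · intro z hz
      simp only [List.foldl_cons]
      have hhead := h2.2 _ (List.mem_cons_self)
      rcases List.mem_cons.mp hz with rfl | hz'
      · exact lexLe_trans hhead hstep.1
      · rcases List.mem_cons.mp hz' with rfl | hz''
        · exact lexLe_trans hhead hstep.2
        · exact h2.2 z (List.mem_cons_of_mem _ hz'')

theorem heapMin_eq_of {h : List (Int × Int)} {y : Int × Int}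
    (hy : y ∈ h) (hle : ∀ x ∈ h, lexLe y x) : heapMin h = some y := by
  match h with
  | [] => cases hy
  | x :: xs =>
    have hs := foldl_min_spec xs x
    have h1 : lexLe y (xs.foldl (fun y z => if heapLt z y then z else y) x) := hle _ hs.1
    have h2 : lexLe (xs.foldl (fun y z => if heapLt z y then z else y) x) y := hs.2 y hy
    simp only [heapMin]
    exact congrArg some (lexLe_antisymm h2 h1)

-- abstract contents of the heap: one key (acc, index) per core
def keysFrom : Int → List Int → List (Int × Int)
  | _, [] => []
  | s, a :: as => (a, s) :: keysFrom (s + 1) as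

theorem mem_keysFrom {x : Int × Int} : ∀ (accs : List Int) (s : Int),
    x ∈ keysFrom s accs ↔ ∃ (j : Nat), ∃ (hj : j < accs.length), x = (accs[j], s + j) := by
  intro accs
  induction accs with
  | nil => intro s; simp [keysFrom]
  | cons a as ih =>
    intro s
    simp only [keysFrom, List.mem_cons, ih]
    constructor
    · rintro (rfl | ⟨j, hj, rfl⟩)
      · exact ⟨0, by simp, by simp⟩
      · refine ⟨j + 1, by simpa using hj, ?_⟩
        simp only [List.getElem_cons_succ]
        congr 1
        push_cast
        omega
    · rintro ⟨j, hj, rfl⟩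
      cases j with
      | zero => left; simp
      | succ j =>
        right
        refine ⟨j, by simpa using hj, ?_⟩
        simp only [List.getElem_cons_succ]
        congr 1
        push_cast
        omega

-- removing core j's key and appending its updated key is, up to order, updating core j
theorem keysFrom_update : ∀ (accs : List Int) (s : Int) (j : Nat) (hj : j < accs.length) (v : Int),
    (((keysFrom s accs).erase (accs[j], s + j)) ++ [(v, s + j)]).Perm (keysFrom s (accs.set j v)) := by
  intro accs
  induction accs with
  | nil => intro s j hj; simp at hj
  | cons a as ih =>
    intro s j hj v
    cases j with
    | zero =>
      simp only [List.getElem_cons_zero, Nat.cast_zero, add_zero, keysFrom, List.set_cons_zero,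
        List.erase_cons_head]
      exact (List.perm_append_comm).trans (by simp)
    | succ j =>
      have hne : ¬ (((a : Int), s) == ((a :: as)[j + 1], s + ((j : Int) + 1))) := by
        simp only [beq_iff_eq, Prod.mk.injEq, not_and]
        intro _; omega
      simp only [keysFrom, List.set_cons_succ]
      rw [List.erase_cons_tail (by simpa using hne)]
      simp only [List.cons_append]
      refine List.Perm.cons _ ?_
      have harith : s + ((j : Int) + 1) = (s + 1) + j := by omega
      have hj' : j < as.length := by simpa using hj
      have := ih (s + 1) j hj' v
      simp only [List.getElem_cons_succ, Nat.cast_succ] at *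
      rw [harith]
      exact this

theorem keysFrom_replicate : ∀ (m : Nat) (s : Int),
    keysFrom s (List.replicate m 0) = (PySem.List.pyRange s (s + m) 1).map (fun i => ((0 : Int), i)) := by
  intro m
  induction m with
  | zero =>
    intro s
    simp only [List.replicate_zero, keysFrom, Nat.cast_zero, add_zero]
    rw [PySem.List.pyRange_one_eq_nil (le_refl s)]
    simp
  | succ m ih =>
    intro s
    rw [PySem.List.pyRange_one_cons (by push_cast; omega)]
    simp only [List.replicate_succ, keysFrom, List.map_cons]
    congr 1
    rw [ih (s + 1)]
    push_cast
    have h2 : s + 1 + (m : Int) = s + ((m : Int) + 1) := by omega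
    rw [h2]

-- pickIdx returns the first argmin: (accs[p], p) is lexLe-least among all (accs[j], j)
theorem pick_aux (accs : List Int) : ∀ (fuel : Nat) (t b : Int), 0 ≤ b → b < t →
    t ≤ (accs.length : Int) → ((accs.length : Int) - t).toNat ≤ fuel →
    (∀ j : Int, 0 ≤ j → j < t →
      lexLe (PySem.List.pyGetD accs b 0, b) (PySem.List.pyGetD accs j 0, j)) →
    (0 ≤ (PySem.List.pyRange t (accs.length : Int) 1).foldl
        (fun b j => if PySem.List.pyGetD accs j 0 < PySem.List.pyGetD accs b 0 then j else b) b ∧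
     (PySem.List.pyRange t (accs.length : Int) 1).foldl
        (fun b j => if PySem.List.pyGetD accs j 0 < PySem.List.pyGetD accs b 0 then j else b) b
        < (accs.length : Int) ∧
     ∀ j : Int, 0 ≤ j → j < (accs.length : Int) →
       lexLe (PySem.List.pyGetD accs
                ((PySem.List.pyRange t (accs.length : Int) 1).foldl
                  (fun b j => if PySem.List.pyGetD accs j 0 < PySem.List.pyGetD accs b 0 then j else b) b) 0,
              (PySem.List.pyRange t (accs.length : Int) 1).foldl
                  (fun b j => if PySem.List.pyGetD accs j 0 < PySem.List.pyGetD accs b 0 then j else b) b)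
             (PySem.List.pyGetD accs j 0, j)) := by
  intro fuel
  induction fuel with
  | zero =>
    intro t b hb0 hbt htl hfuel hinv
    have ht : t = (accs.length : Int) := by omega
    rw [ht, PySem.List.pyRange_one_eq_nil (le_refl _)]
    simp only [List.foldl_nil]
    exact ⟨hb0, by omega, fun j hj0 hjl => hinv j hj0 (by omega)⟩
  | succ fuel ih =>
    intro t b hb0 hbt htl hfuel hinv
    by_cases hlt : t < (accs.length : Int)
    · rw [PySem.List.pyRange_one_cons hlt]
      simp only [List.foldl_cons]
      by_cases hc : PySem.List.pyGetD accs t 0 < PySem.List.pyGetD accs b 0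
      · rw [if_pos hc]
        refine ih (t + 1) t (by omega) (by omega) (by omega) (by omega) ?_
        intro j hj0 hjt
        rcases lt_or_ge j t with hj | hj
        · have h1 := hinv j hj0 hj
          simp only [lexLe] at *
          omega
        · have : j = t := by omega
          subst this
          exact lexLe_refl _
      · rw [if_neg hc]
        refine ih (t + 1) b hb0 (by omega) (by omega) (by omega) ?_
        intro j hj0 hjt
        rcases lt_or_ge j t with hj | hj
        · exact hinv j hj0 hj
        · have : j = t := by omega
          subst this
          simp only [lexLe]
          omega
    · have ht : t = (accs.length : Int) := by omega
      rw [ht, PySem.List.pyRange_one_eq_nil (le_refl _)]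
      simp only [List.foldl_nil]
      exact ⟨hb0, by omega, fun j hj0 hjl => hinv j hj0 (by omega)⟩

theorem pickIdx_spec (accs : List Int) (hne : accs ≠ []) :
    0 ≤ pickIdx accs ∧ pickIdx accs < accs.length ∧
      ∀ j : Int, 0 ≤ j → j < accs.length →
        lexLe (PySem.List.pyGetD accs (pickIdx accs) 0, pickIdx accs)
              (PySem.List.pyGetD accs j 0, j) := by
  have hlen : 1 ≤ (accs.length : Int) := by
    have := List.length_pos_of_ne_nil hne
    omega
  have := pick_aux accs ((accs.length : Int) - 1).toNat 1 0 (le_refl 0) (by omega) hlen (by omega)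
    (fun j hj0 hj1 => by
      have : j = 0 := by omega
      subst this
      exact lexLe_refl _)
  exact this

-- the key of the picked core, and why it is the heap minimum
theorem pick_key_mem_keys {accs : List Int} (h1 : accs ≠ []) :
    (PySem.List.pyGetD accs (pickIdx accs) 0, pickIdx accs) ∈ keysFrom 0 accs := by
  obtain ⟨hp0, hplt, _⟩ := pickIdx_spec accs h1
  rw [mem_keysFrom]
  refine ⟨(pickIdx accs).toNat, by omega, ?_⟩
  rw [PySem.List.pyGetD_eq_getElem accs 0 hp0 hplt]
  congr 1
  omega

theorem pop_key_mem {accs : List Int} {heap : List (Int × Int)} (h1 : accs ≠ [])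
    (h3 : heap.Perm (keysFrom 0 accs)) :
    (PySem.List.pyGetD accs (pickIdx accs) 0, pickIdx accs) ∈ heap :=
  h3.mem_iff.mpr (pick_key_mem_keys h1)

theorem pop_key_least {accs : List Int} {heap : List (Int × Int)} (h1 : accs ≠ [])
    (h3 : heap.Perm (keysFrom 0 accs)) :
    ∀ x ∈ heap, lexLe (PySem.List.pyGetD accs (pickIdx accs) 0, pickIdx accs) x := by
  obtain ⟨hp0, hplt, hleast⟩ := pickIdx_spec accs h1
  intro x hx
  have hx' := h3.mem_iff.mp hx
  rw [mem_keysFrom] at hx'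
  obtain ⟨j, hj, rfl⟩ := hx'
  have hle2 := hleast j (by omega) (by exact_mod_cast hj)
  rw [PySem.List.pyGetD_eq_getElem (i := (j : Int)) accs 0 (by omega) (by exact_mod_cast hj)]
    at hle2
  simpa using hle2

theorem stepB_length (cores accs : List Int) : (stepB cores accs).length = accs.length := by
  simp [stepB, PySem.List.length_pySetD]

theorem stepB_ne_nil {cores accs : List Int} (h1 : accs ≠ []) : stepB cores accs ≠ [] := by
  have := List.length_pos_of_ne_nil h1
  have h2 := stepB_length cores accs
  intro hc
  rw [hc] at h2
  simp at h2
  omega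

theorem perm_after_step {cores accs : List Int} {heap : List (Int × Int)} (h1 : accs ≠ [])
    (h2 : accs.length = cores.length) (h3 : heap.Perm (keysFrom 0 accs)) :
    ((heap.erase (PySem.List.pyGetD accs (pickIdx accs) 0, pickIdx accs)) ++
        [(PySem.List.pyGetD accs (pickIdx accs) 0 + PySem.List.pyGetD cores (pickIdx accs) 0,
          pickIdx accs)]).Perm (keysFrom 0 (stepB cores accs)) := by
  obtain ⟨hp0, hplt, _⟩ := pickIdx_spec accs h1
  set p := pickIdx accs with hp
  set v := PySem.List.pyGetD accs p 0 + PySem.List.pyGetD cores p 0 with hv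
  have hB : stepB cores accs = accs.set p.toNat v := by
    simp only [stepB, ← hp, ← hv]
    exact PySem.List.pySetD_of_nonneg accs _ hp0
  have hjn : p.toNat < accs.length := by omega
  have hupd := keysFrom_update accs 0 p.toNat hjn v
  have hkey : ((accs[p.toNat] : Int), (0 : Int) + (p.toNat : Int)) =
      (PySem.List.pyGetD accs p 0, p) := by
    rw [PySem.List.pyGetD_eq_getElem accs 0 hp0 hplt]
    congr 1
    omega
  rw [hkey] at hupd
  have hzp : (0 : Int) + (p.toNat : Int) = p := by omega
  rw [hzp] at hupd
  rw [hB]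
  exact ((h3.erase _).append_right _).trans hupd

-- the main simulation: a heap holding the keys of accs runs like B's accumulator loop
theorem awhile_eq (cores : List Int) : ∀ (k : Nat) (accs : List Int) (heap : List (Int × Int)),
    accs ≠ [] → accs.length = cores.length → heap.Perm (keysFrom 0 accs) →
    awhile cores heap (k + 1) = some (pickIdx ((fun a => stepB cores a)^[k] accs) + 1) := by
  intro k
  induction k with
  | zero =>
    intro accs heap h1 h2 h3
    have hmin := heapMin_eq_of (pop_key_mem h1 h3) (pop_key_least h1 h3)
    have hpop : heappop heap =
        some ((PySem.List.pyGetD accs (pickIdx accs) 0, pickIdx accs),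
          heap.erase (PySem.List.pyGetD accs (pickIdx accs) 0, pickIdx accs)) := by
      simp [heappop, hmin]
    simp only [awhile, hpop]
    simp
  | succ k ih =>
    intro accs heap h1 h2 h3
    have hmin := heapMin_eq_of (pop_key_mem h1 h3) (pop_key_least h1 h3)
    have hpop : heappop heap =
        some ((PySem.List.pyGetD accs (pickIdx accs) 0, pickIdx accs),
          heap.erase (PySem.List.pyGetD accs (pickIdx accs) 0, pickIdx accs)) := by
      simp [heappop, hmin]
    simp only [awhile, hpop]
    rw [if_neg (Nat.succ_ne_zero k)]
    rw [Function.iterate_succ_apply]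
    simp only [heappush]
    exact ih (stepB cores accs) _ (stepB_ne_nil h1) (by rw [stepB_length]; exact h2)
      (perm_after_step h1 h2 h3)

-- ===== VERDICT (by name: the statement is the Claim_ definition above) =====
theorem solution_spec : Claim_equal_solution := by
  intro n cores hdom hpre
  obtain ⟨hn, hcne⟩ := hpre
  have hm : 0 < cores.length := List.length_pos_of_ne_nil hcne
  have hheap : ((PySem.List.pyRange 0 (cores.length : Int) 1).foldl
      (fun h i => heappush h (0, i)) []) = keysFrom 0 (List.replicate cores.length 0) := by
    simp only [heappush]
    rw [PySem.List.foldl_append_singleton_eq_map (fun i => ((0 : Int), i))]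
    rw [keysFrom_replicate]
    simp
  have hacc : (List.replicate cores.length (0 : Int)) ≠ [] := by
    simp only [ne_eq, List.replicate_eq_nil_iff]
    omega
  have hfuel : n.toNat = (n - 1).toNat + 1 := by omega
  show (awhile cores ((PySem.List.pyRange 0 (cores.length : Int) 1).foldl
      (fun h i => heappush h (0, i)) []) n.toNat).getD 0 =
    pickIdx ((fun a => stepB cores a)^[(n - 1).toNat] (List.replicate cores.length 0)) + 1
  rw [hheap, hfuel]
  rw [awhile_eq cores ((n - 1).toNat) (List.replicate cores.length 0) _ hacc (by simp)
    (List.Perm.refl _)]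
  simp
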